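-- pv_equiv track=rewrite | github.com/MrBrantCode/unitest_baseline | mut_generate/mist_train_cf/cf_72807/solution.py | product_of_primes
-- ===== SOURCE A (Python) =====
-- def product_of_primes(n):
--     primes = [True for i in range(n+1)]
--     p = 2
--     while(p * p <= n):
--         if (primes[p] == True):
--             for i in range(p * p, n+1, p):
--                 primes[i] = False
--         p += 1
--     prime_product = 1
--     for i in range(2, n+1):
--         if primes[i]:
--             prime_product *= i
--     return prime_product
-- ===== SOURCE B (Python) =====
-- def product_of_primes(n):
--     # trial division per number instead of a sieve table
--     product = 1
--     for i in range(2, n + 1):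
--         is_prime = True
--         d = 2
--         while d * d <= i:
--             if i % d == 0:
--                 is_prime = False
--                 break
--             d += 1
--         if is_prime:
--             product *= i
--     return product
-- ===== Notes on version B (the rewrite author's own statement) =====
-- stated objective: alternative
-- what changed: B tests each number independently by trial division up to its square root and multiplies primes in one pass, instead of building a boolean sieve table and then scanning it.
import Mathlib
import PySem

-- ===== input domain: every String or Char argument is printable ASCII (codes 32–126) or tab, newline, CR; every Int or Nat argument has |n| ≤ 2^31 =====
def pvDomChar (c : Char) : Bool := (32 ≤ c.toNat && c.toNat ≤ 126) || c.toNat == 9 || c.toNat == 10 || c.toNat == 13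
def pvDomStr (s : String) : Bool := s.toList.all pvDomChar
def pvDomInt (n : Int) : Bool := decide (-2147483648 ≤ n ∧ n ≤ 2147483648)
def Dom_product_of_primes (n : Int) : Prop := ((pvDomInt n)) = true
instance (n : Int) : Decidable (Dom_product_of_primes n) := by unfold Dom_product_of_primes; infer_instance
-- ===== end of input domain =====

-- B replaces A's boolean sieve table by independent trial division of each number (alternative algorithm, same results).

-- ===== PORT A =====
-- primes = [True for i in range(n+1)]
def ppInit (n : Int) : List Bool := (PySem.List.pyRange 0 (n + 1) 1).map (fun _ => true)

-- 'for i in range(p*p, n+1, p): primes[i] = False'  (indices are in range, so pySetD is exact)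
def ppMark (n p : Int) (primes : List Bool) : List Bool :=
  (PySem.List.pyRange (p * p) (n + 1) p).foldl (fun ps i => PySem.List.pySetD ps i false) primes

theorem ppSieve_dec {n p : Int} (h : p * p ≤ n) : (n + 1 - (p + 1)).toNat < (n + 1 - p).toNat := by
  have hp : p ≤ n := by nlinarith [sq_nonneg p, sq_nonneg (p - 1)]
  omega

-- the while loop: while p*p <= n: if primes[p] == True: mark; p += 1   (primes[p] is in range there)
def ppSieve (n p : Int) (primes : List Bool) : List Bool :=
  if h : p * p ≤ n then
    ppSieve n (p + 1)
      (if PySem.List.pyGetD primes p false = true then ppMark n p primes else primes)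
  else primes
termination_by (n + 1 - p).toNat
decreasing_by exact ppSieve_dec h

def product_of_primes (n : Int) : Int :=
  let primes := ppSieve n 2 (ppInit n)
  (PySem.List.pyRange 2 (n + 1) 1).foldl
    (fun acc i => if PySem.List.pyGetD primes i false = true then acc * i else acc) 1

-- ===== PORT B =====
-- 'while d*d <= i: if i % d == 0: is_prime = False; break; d += 1'
def ppTrial (i d : Int) : Bool :=
  if h : d * d ≤ i then
    if PySem.Int.mod i d = 0 then false else ppTrial i (d + 1)
  else true
termination_by (i + 1 - d).toNat
decreasing_by exact ppSieve_dec h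

def product_of_primes_alt (n : Int) : Int :=
  (PySem.List.pyRange 2 (n + 1) 1).foldl
    (fun acc i => if ppTrial i 2 then acc * i else acc) 1

-- ===== PRECONDITION & SPEC =====
def Spec_product_of_primes (n : Int) (out : Int) : Prop := out = product_of_primes_alt n
instance (n : Int) (out : Int) : Decidable (Spec_product_of_primes n out) := by unfold Spec_product_of_primes; infer_instance

-- ===== CLAIM (what is proved, stated in full; the proofs are below) =====
def Claim_equal_product_of_primes : Prop := ∀ (n : Int), Dom_product_of_primes n → Spec_product_of_primes n (product_of_primes n)

-- ===== LEMMAS AND PROOFS =====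

-- "i has a nontrivial small divisor" — the common characterisation both programs compute the complement of
def HasDiv (i : Int) : Prop := ∃ q, 2 ≤ q ∧ q * q ≤ i ∧ q ∣ i

-- set of already-crossed-out numbers after the outer loop has processed all p' < p
def Marked (p j : Int) : Prop := ∃ q, 2 ≤ q ∧ q < p ∧ q * q ≤ j ∧ q ∣ j

-- once p*p > n, being marked is exactly having a small nontrivial divisor
theorem marked_final {p n j : Int} (hp : 2 ≤ p) (hstop : ¬ p * p ≤ n) (hjn : j ≤ n) :
    Marked p j ↔ HasDiv j := by
  constructor
  · rintro ⟨q, h2q, _, hqq, hqd⟩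
    exact ⟨q, h2q, hqq, hqd⟩
  · rintro ⟨q, h2q, hqq, hqd⟩
    refine ⟨q, h2q, ?_, hqq, hqd⟩
    by_contra hqp
    push_neg at hqp
    nlinarith

theorem trial_stop {i d : Int} (hd : 2 ≤ d) (h : ¬ d * d ≤ i) :
    ∀ e, d ≤ e → e * e ≤ i → ¬ e ∣ i := by
  intro e he hee _
  exact h (le_trans (by nlinarith) hee)

theorem ppTrial_iff_aux (i : Int) : ∀ k d, (i + 1 - d).toNat ≤ k → 2 ≤ d →
    (ppTrial i d = true ↔ ∀ e, d ≤ e → e * e ≤ i → ¬ e ∣ i) := by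
  intro k
  induction k with
  | zero =>
    intro d hk hd
    have hid : i < d := by omega
    have h : ¬ d * d ≤ i := by nlinarith
    rw [ppTrial, dif_neg h]
    simp only [true_iff]
    exact trial_stop hd h
  | succ k ih =>
    intro d hk hd
    rw [ppTrial]
    split_ifs with h hm
    · -- i % d == 0 : not prime, and d itself is a witness
      simp only [false_iff]
      rw [not_forall]
      refine ⟨d, fun H => ?_⟩
      exact H (le_refl d) h ((PySem.Int.mod_eq_zero_iff_dvd i d).mp hm)
    · -- recurse on d+1
      have hdi : d ≤ i := by nlinarith
      rw [ih (d + 1) (by omega) (by omega)]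
      constructor
      · intro H e he hee hdvd
        by_cases hde : e = d
        · exact hm ((PySem.Int.mod_eq_zero_iff_dvd i d).mpr (hde ▸ hdvd))
        · exact H e (by omega) hee hdvd
      · intro H e he hee hdvd
        exact H e (by omega) hee hdvd
    · simp only [true_iff]
      exact trial_stop hd h

theorem ppTrial_iff (i : Int) (d : Int) (hd : 2 ≤ d) :
    (ppTrial i d = true ↔ ∀ e, d ≤ e → e * e ≤ i → ¬ e ∣ i) :=
  ppTrial_iff_aux i (i + 1 - d).toNat d (le_refl _) hd

theorem getD_set_bool (xs : List Bool) (m k : Nat) (v d : Bool) :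
    (xs.set m v).getD k d = if k = m ∧ m < xs.length then v else xs.getD k d := by
  simp only [List.getD_eq_getElem?_getD, List.getElem?_set]
  split_ifs with h1 h2 h2 <;> simp_all

theorem foldl_setFalse_length (L : List Int) (primes : List Bool) :
    (L.foldl (fun ps i => PySem.List.pySetD ps i false) primes).length = primes.length := by
  induction L generalizing primes with
  | nil => rfl
  | cons x L ih => simp [List.foldl_cons, ih, PySem.List.length_pySetD]

theorem foldl_setFalse_getD (L : List Int) (primes : List Bool) (j : Int)
    (hL : ∀ x ∈ L, 0 ≤ x ∧ x.toNat < primes.length) (hj : 0 ≤ j) :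
    PySem.List.pyGetD (L.foldl (fun ps i => PySem.List.pySetD ps i false) primes) j false
      = if j ∈ L then false else PySem.List.pyGetD primes j false := by
  induction L generalizing primes with
  | nil => simp
  | cons x L ih =>
    obtain ⟨hx0, hxl⟩ := hL x List.mem_cons_self
    have hlen : (PySem.List.pySetD primes x false).length = primes.length := by
      rw [PySem.List.pySetD_of_nonneg primes false hx0, List.length_set]
    rw [List.foldl_cons,
      ih (PySem.List.pySetD primes x false)
        (fun y hy => by rw [hlen]; exact hL y (List.mem_cons_of_mem _ hy)) ]
    have hset : PySem.List.pyGetD (PySem.List.pySetD primes x false) j false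
        = if j = x then false else PySem.List.pyGetD primes j false := by
      rw [PySem.List.pySetD_of_nonneg primes false hx0,
        PySem.List.pyGetD_of_nonneg _ _ hj,
        PySem.List.pyGetD_of_nonneg _ _ hj, getD_set_bool]
      split_ifs with h1 h2 h2 <;> first | rfl | omega
    rw [hset]
    by_cases hjL : j ∈ L <;> by_cases hjx : j = x <;>
      simp [hjL, hjx, List.mem_cons]

theorem sieve_char (n : Int) : ∀ fuel p primes, (n + 1 - p).toNat ≤ fuel → 2 ≤ p →
    primes.length = (n + 1).toNat →
    (∀ j, 0 ≤ j → j ≤ n → (PySem.List.pyGetD primes j false = false ↔ Marked p j)) →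
    ∀ j, 0 ≤ j → j ≤ n →
      (PySem.List.pyGetD (ppSieve n p primes) j false = false ↔ HasDiv j) := by
  intro fuel
  induction fuel with
  | zero =>
    intro p primes hk hp hlen hinv j hj0 hjn
    have hge : n + 1 ≤ p := by omega
    have hstop : ¬ p * p ≤ n := by nlinarith
    rw [ppSieve, dif_neg hstop]
    rw [hinv j hj0 hjn]
    exact marked_final hp hstop hjn
  | succ fuel ih =>
    intro p primes hk hp hlen hinv j hj0 hjn
    rw [ppSieve]
    by_cases hpn : p * p ≤ n
    · rw [dif_pos hpn]
      -- loop body: p*p ≤ n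
      have hn0 : 0 ≤ n := le_trans (by positivity) hpn
      have hpln : p ≤ n := by nlinarith
      have step : ∀ primes',
          primes'.length = (n + 1).toNat →
          (∀ j', 0 ≤ j' → j' ≤ n →
            (PySem.List.pyGetD primes' j' false = false ↔ Marked (p + 1) j')) →
          ∀ j', 0 ≤ j' → j' ≤ n →
            (PySem.List.pyGetD (ppSieve n (p + 1) primes') j' false = false ↔ HasDiv j') :=
        fun primes' h1 h2 => ih (p + 1) primes' (by omega) (by omega) h1 h2
      by_cases hg : PySem.List.pyGetD primes p false = true
      · rw [if_pos hg]
        -- the marking pass crosses out exactly the multiples of p starting at p*p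
        have hmem : ∀ x, x ∈ PySem.List.pyRange (p * p) (n + 1) p ↔
            (p * p ≤ x ∧ x ≤ n ∧ p ∣ x) := by
          intro x
          rw [PySem.List.mem_pyRange_iff_of_pos (by omega)]
          constructor
          · rintro ⟨h1, h2, h3⟩
            refine ⟨h1, by omega, ?_⟩
            have hpp : p ∣ p * p := Dvd.intro p rfl
            simpa using dvd_add h3 hpp
          · rintro ⟨h1, h2, h3⟩
            exact ⟨h1, by omega, dvd_sub h3 (Dvd.intro p rfl)⟩
        refine step (ppMark n p primes) ?_ ?_ j hj0 hjn
        · rw [ppMark, foldl_setFalse_length, hlen]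
        · intro j' hj0' hjn'
          rw [ppMark, foldl_setFalse_getD _ _ _ ?side hj0']
          case side =>
            intro x hx
            rw [hmem] at hx
            constructor
            · nlinarith [hx.1]
            · rw [hlen]; omega
          simp only [hmem j']
          by_cases hin : p * p ≤ j' ∧ j' ≤ n ∧ p ∣ j'
          · simp only [if_pos hin]
            constructor
            · intro _
              exact ⟨p, hp, by omega, hin.1, hin.2.2⟩
            · intro _; trivial
          · rw [if_neg hin, hinv j' hj0' hjn']
            constructor
            · rintro ⟨q, h2q, hqp, hqq, hqd⟩
              exact ⟨q, h2q, by omega, hqq, hqd⟩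
            · rintro ⟨q, h2q, hqp1, hqq, hqd⟩
              by_cases hqp : q < p
              · exact ⟨q, h2q, hqp, hqq, hqd⟩
              · -- q = p: contradicts j' ∉ marked range
                have hq : q = p := by omega
                subst hq
                exact absurd ⟨hqq, hjn', hqd⟩ hin
      · rw [if_neg hg]
        -- primes[p] already crossed out: p is composite, its multiples are already covered
        have hpfalse : PySem.List.pyGetD primes p false = false := by
          cases h : PySem.List.pyGetD primes p false
          · rfl
          · exact absurd h hg
        have hmp : Marked p p := (hinv p (by omega) hpln).mp hpfalse
        refine step primes hlen ?_ j hj0 hjn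
        intro j' hj0' hjn'
        rw [hinv j' hj0' hjn']
        constructor
        · rintro ⟨q, h2q, hqp, hqq, hqd⟩
          exact ⟨q, h2q, by omega, hqq, hqd⟩
        · rintro ⟨q, h2q, hqp1, hqq, hqd⟩
          by_cases hqp : q < p
          · exact ⟨q, h2q, hqp, hqq, hqd⟩
          · have hq : q = p := by omega
            subst hq
            obtain ⟨r, h2r, hrp, hrr, hrd⟩ := hmp
            exact ⟨r, h2r, hrp, by nlinarith, dvd_trans hrd hqd⟩
    · rw [dif_neg hpn, hinv j hj0 hjn]
      exact marked_final hp hpn hjn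

theorem final_eq (n i : Int) (h2 : 2 ≤ i) (hn : i ≤ n) :
    PySem.List.pyGetD (ppSieve n 2 (ppInit n)) i false = ppTrial i 2 := by
  have hn0 : 0 ≤ n := by omega
  have hlen : (ppInit n).length = (n + 1).toNat := by
    simp [ppInit]
  have hinit : ∀ j, 0 ≤ j → j ≤ n →
      (PySem.List.pyGetD (ppInit n) j false = false ↔ Marked 2 j) := by
    intro j hj0 hjn
    rw [ppInit, PySem.List.pyGetD_map_pyRange_of_nonneg _ _ _ _ hj0 (by omega)]
    constructor
    · intro h; cases h
    · rintro ⟨q, h2q, hq2, _, _⟩; omega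
  have hchar := sieve_char n (n + 1 - 2).toNat 2 (ppInit n) (le_refl _) (by omega)
      hlen hinit i (by omega) hn
  have htrial := ppTrial_iff i 2 (by omega)
  cases hA : PySem.List.pyGetD (ppSieve n 2 (ppInit n)) i false with
  | false =>
    cases hB : ppTrial i 2 with
    | false => rfl
    | true =>
      exfalso
      rw [hA] at hchar
      obtain ⟨q, hq1, hq2, hq3⟩ := hchar.mp rfl
      exact htrial.mp hB q hq1 hq2 hq3
  | true =>
    cases hB : ppTrial i 2 with
    | true => rfl
    | false =>
      exfalso
      have hnot : ¬ (∀ e, 2 ≤ e → e * e ≤ i → ¬ e ∣ i) := by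
        intro H
        rw [htrial.mpr H] at hB
        cases hB
      push_neg at hnot
      obtain ⟨e, h1, h2', h3⟩ := hnot
      have hfalse := hchar.mpr ⟨e, h1, h2', h3⟩
      rw [hA] at hfalse
      cases hfalse

-- ===== VERDICT (by name: the statement is the Claim_ definition above) =====
theorem product_of_primes_spec : Claim_equal_product_of_primes := by
  intro n _hd
  unfold Spec_product_of_primes product_of_primes product_of_primes_alt
  refine PySem.List.foldl_congr_mem _ _ _ _ ?_
  intro acc i hi
  rw [PySem.List.mem_pyRange_one] at hi
  rw [final_eq n i hi.1 (by omega)]
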